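-- pv_equiv track=rewrite | github.com/relinee/TinkoffAlgoCourseTasks | Contest 5 (Hashing)/task_b.py | prefix_polynomial_hash
-- ===== SOURCE A (Python) =====
-- def prefix_polynomial_hash(str, k, mod):
--     h = [0] * (len(str) + 1)
--     i = 0
--     for s in str:
--         x = int(ord(s) - ord('a') + 1)
--         h[i + 1] = (h[i] * k + x) % mod
--         i += 1
--     return h
-- ===== SOURCE B (Python) =====
-- def prefix_polynomial_hash(str, k, mod):
--     # Direct definition: h[i] is the value of the degree-(i-1) polynomial of the
--     # first i character values at k, reduced once modulo mod (no rolling recurrence).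
--     xs = [ord(c) - 96 for c in str]
--     return [0] + [sum(x * k ** e for e, x in enumerate(reversed(xs[:i]))) % mod
--                   for i in range(1, len(xs) + 1)]
-- ===== Notes on version B (the rewrite author's own statement) =====
-- stated objective: alternative
-- what changed: Replaces A's rolling Horner recurrence (h[i+1] = (h[i]*k + x) % mod with mod at every step) by the direct closed form: each prefix hash is computed independently as the polynomial sum of x*k^e over the reversed prefix, reduced modulo mod once.
import Mathlib
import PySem

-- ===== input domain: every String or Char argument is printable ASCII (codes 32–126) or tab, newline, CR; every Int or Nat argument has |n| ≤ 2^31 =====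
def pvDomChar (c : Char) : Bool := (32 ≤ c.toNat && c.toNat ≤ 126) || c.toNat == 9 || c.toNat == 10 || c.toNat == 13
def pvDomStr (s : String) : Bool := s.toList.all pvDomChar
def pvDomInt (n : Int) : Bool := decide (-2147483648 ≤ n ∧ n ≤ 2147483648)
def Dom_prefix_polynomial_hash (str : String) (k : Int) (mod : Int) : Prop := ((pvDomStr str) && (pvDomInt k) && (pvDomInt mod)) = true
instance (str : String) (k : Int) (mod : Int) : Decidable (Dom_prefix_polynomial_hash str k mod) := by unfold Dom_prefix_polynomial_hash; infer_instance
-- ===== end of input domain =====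

-- B replaces A's rolling Horner recurrence with mod at each step by the direct
-- closed-form evaluation of each prefix polynomial reduced modulo mod once;
-- objective: alternative (not faster).

-- ===== PORT A =====
-- A's loop: h preallocated to zeros, i a running index, h[i+1] = (h[i]*k + x) % mod.
-- h[i] is always in range in A, so the read is ported as getD (exact here).
def pvGoA (k mod : Int) : List Char → List Int × Nat → List Int
  | [], (h, _) => h
  | s :: rest, (h, i) =>
      let x : Int := ((s.toNat : Int) - 97) + 1
      pvGoA k mod rest (h.set (i + 1) (PySem.Int.mod (h.getD i 0 * k + x) mod), i + 1)

def prefix_polynomial_hash (str : String) (k : Int) (mod : Int) : List Int :=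
  pvGoA k mod str.toList (List.replicate (str.toList.length + 1) 0, 0)

-- ===== PORT B =====
-- B: xs = [ord(c)-96 for c in str];
--    [0] + [sum(x * k**e for e, x in enumerate(reversed(xs[:i]))) % mod for i in range(1, len(xs)+1)]
-- The exponent e from enumerate is an Int that is always ≥ 0, so k**e is ported as k ^ e.toNat (exact here).
def prefix_polynomial_hash_alt (str : String) (k : Int) (mod : Int) : List Int :=
  let xs : List Int := str.toList.map (fun c => ((c.toNat : Int) - 96))
  [0] ++ (PySem.List.pyRange 1 ((xs.length : Int) + 1) 1).map (fun i =>
    PySem.Int.mod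
      ((PySem.List.enumerate (PySem.List.slice xs none (some i)).reverse 0).foldl
        (fun a p => a + p.2 * k ^ p.1.toNat) 0) mod)

-- ===== PRECONDITION & SPEC =====
-- Pre_ excludes exactly the inputs where Python A raises ZeroDivisionError:
-- mod = 0 with a nonempty string (B raises there too).
def Pre_prefix_polynomial_hash (str : String) (k : Int) (mod : Int) : Prop :=
  mod ≠ 0 ∨ str = ""
instance (str : String) (k : Int) (mod : Int) : Decidable (Pre_prefix_polynomial_hash str k mod) := by
  unfold Pre_prefix_polynomial_hash; infer_instance

def pvWitness_prefix_polynomial_hash : String × Int × Int := ("ab", 31, 997)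

def Spec_prefix_polynomial_hash (str : String) (k : Int) (mod : Int) (out : List Int) : Prop := out = prefix_polynomial_hash_alt str k mod
instance (str : String) (k : Int) (mod : Int) (out : List Int) : Decidable (Spec_prefix_polynomial_hash str k mod out) := by unfold Spec_prefix_polynomial_hash; infer_instance

-- ===== CLAIM (what is proved, stated in full; the proofs are below) =====
def Claim_equal_prefix_polynomial_hash : Prop := ∀ (str : String) (k : Int) (mod : Int), Dom_prefix_polynomial_hash str k mod → Pre_prefix_polynomial_hash str k mod → Spec_prefix_polynomial_hash str k mod (prefix_polynomial_hash str k mod)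

-- ===== LEMMAS AND PROOFS =====

-- Horner value of a list of coefficients (most significant first), no mod.
def pvHorner (k : Int) : List Int → Int := List.foldl (fun a x => a * k + x) 0

-- Sum of x_idx * k^idx (least significant first).
def pvPoly (k : Int) : List Int → Int
  | [] => 0
  | x :: t => x + k * pvPoly k t

-- Rolling-accumulator reformulation of A's loop (proof helper only).
def pvRoll (k mod : Int) : List Char → Int → List Int → List Int
  | [], _, h => h
  | s :: rest, acc, h =>
      let acc' := PySem.Int.mod (acc * k + ((s.toNat : Int) - 96)) mod
      pvRoll k mod rest acc' (h ++ [acc'])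

-- The stepwise-mod values of A, as a function of the unreduced running polynomial.
def pvPref (k mod : Int) : List Char → Int → List Int
  | [], _ => []
  | c :: rest, P =>
      let P' := P * k + ((c.toNat : Int) - 96)
      PySem.Int.mod P' mod :: pvPref k mod rest P'

theorem pvGetD_append_mid (g : List Int) (a : Int) (t : List Int) :
    (g ++ a :: t).getD g.length 0 = a := by
  simp [List.getD_eq_getElem?_getD]

theorem pvSet_append_mid (g : List Int) (a b v : Int) (t : List Int) :
    (g ++ a :: b :: t).set (g.length + 1) v = g ++ a :: v :: t := by
  induction g with
  | nil => simp [List.set]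
  | cons x xs ih => simp [ih]

-- A's array loop equals the rolling-accumulator loop.
theorem pvGoA_eq_roll (k mod : Int) : ∀ (cs : List Char) (g : List Int) (a : Int),
    pvGoA k mod cs (g ++ a :: List.replicate cs.length 0, g.length) = pvRoll k mod cs a (g ++ [a]) := by
  intro cs
  induction cs with
  | nil => intro g a; simp [pvGoA, pvRoll]
  | cons c rest ih =>
    intro g a
    have hx : ((c.toNat : Int) - 97) + 1 = (c.toNat : Int) - 96 := by ring
    simp only [pvGoA, pvRoll, List.length_cons, List.replicate_succ,
      pvGetD_append_mid, pvSet_append_mid, hx]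
    have := ih (g ++ [a]) (PySem.Int.mod (a * k + ((c.toNat : Int) - 96)) mod)
    simpa using this

-- Python % respects congruence mod b.
theorem pvModCongr (a a' b : Int) (hb : b ≠ 0) (hd : b ∣ (a - a')) :
    PySem.Int.mod a b = PySem.Int.mod a' b := by
  have h1 := PySem.Int.floordiv_mul_add_mod a b
  have h2 := PySem.Int.floordiv_mul_add_mod a' b
  have hd2 : b ∣ (PySem.Int.mod a b - PySem.Int.mod a' b) := by
    obtain ⟨t, ht⟩ := hd
    exact ⟨t - (PySem.Int.floordiv a b - PySem.Int.floordiv a' b), by linarith [ht]⟩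
  have habs : |b| ∣ (PySem.Int.mod a b - PySem.Int.mod a' b) := (abs_dvd _ _).mpr hd2
  have hz : PySem.Int.mod a b - PySem.Int.mod a' b = 0 := by
    refine Int.eq_zero_of_abs_lt_dvd habs ?_
    rcases lt_or_gt_of_ne hb with hneg | hpos
    · have b1 := PySem.Int.mod_neg_bounds a hneg
      have b2 := PySem.Int.mod_neg_bounds a' hneg
      rw [abs_lt, abs_of_neg hneg]; omega
    · have b1 := PySem.Int.mod_nonneg a hpos
      have b2 := PySem.Int.mod_lt a hpos
      have b3 := PySem.Int.mod_nonneg a' hpos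
      have b4 := PySem.Int.mod_lt a' hpos
      rw [abs_lt, abs_of_pos hpos]; omega
  omega

theorem pvMod_mod_step (P k x b : Int) (hb : b ≠ 0) :
    PySem.Int.mod (PySem.Int.mod P b * k + x) b = PySem.Int.mod (P * k + x) b := by
  refine pvModCongr _ _ _ hb ?_
  have h1 := PySem.Int.floordiv_mul_add_mod P b
  refine ⟨-(PySem.Int.floordiv P b) * k, ?_⟩
  have : PySem.Int.mod P b = P - PySem.Int.floordiv P b * b := by linarith
  rw [this]; ring

theorem pvMod_zero (b : Int) : PySem.Int.mod 0 b = 0 := by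
  simp [PySem.Int.mod]

-- The rolling loop, started at the reduced running polynomial, produces pvPref.
theorem pvRoll_eq_pref (k mod : Int) (hb : mod ≠ 0) : ∀ (cs : List Char) (P : Int) (h : List Int),
    pvRoll k mod cs (PySem.Int.mod P mod) h = h ++ pvPref k mod cs P := by
  intro cs
  induction cs with
  | nil => intro P h; simp [pvRoll, pvPref]
  | cons c rest ih =>
    intro P h
    simp only [pvRoll, pvPref]
    rw [pvMod_mod_step P k _ mod hb]
    rw [ih (P * k + ((c.toNat : Int) - 96)) (h ++ [PySem.Int.mod (P * k + ((c.toNat : Int) - 96)) mod])]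
    simp

-- pvHorner over a snoc.
theorem pvHorner_snoc (k : Int) (u : List Int) (x : Int) :
    pvHorner k (u ++ [x]) = pvHorner k u * k + x := by
  simp [pvHorner, List.foldl_append]

-- pvPref values are the mods of the Horner values of the growing prefixes.
theorem pvPref_eq_map (k mod : Int) : ∀ (cs : List Char) (pre : List Int),
    pvPref k mod cs (pvHorner k pre) =
      (List.range cs.length).map (fun t =>
        PySem.Int.mod (pvHorner k (pre ++ (cs.map (fun c => ((c.toNat : Int) - 96))).take (t + 1))) mod) := by
  intro cs
  induction cs with
  | nil => intro pre; simp [pvPref]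
  | cons c rest ih =>
    intro pre
    simp only [pvPref, List.length_cons, List.range_succ_eq_map, List.map_cons, List.map_map]
    rw [List.cons_eq_cons]
    refine ⟨?_, ?_⟩
    · rw [← pvHorner_snoc k pre ((c.toNat : Int) - 96)]
      simp
    · rw [← pvHorner_snoc k pre ((c.toNat : Int) - 96), ih (pre ++ [((c.toNat : Int) - 96)])]
      apply List.map_congr_left
      intro t _
      simp [Function.comp, List.append_assoc]

-- pvPoly over a snoc.
theorem pvPoly_snoc (k : Int) : ∀ (u : List Int) (x : Int),
    pvPoly k (u ++ [x]) = pvPoly k u + x * k ^ u.length := by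
  intro u
  induction u with
  | nil => intro x; simp [pvPoly]
  | cons y t ih => intro x; simp only [List.cons_append, pvPoly, ih, List.length_cons]; ring

-- Horner from an arbitrary accumulator.
theorem pvHorner_gen (k : Int) : ∀ (t : List Int) (a : Int),
    t.foldl (fun a x => a * k + x) a = a * k ^ t.length + pvPoly k t.reverse := by
  intro t
  induction t with
  | nil => intro a; simp [pvPoly]
  | cons x t' ih =>
    intro a
    simp only [List.foldl_cons, ih, List.reverse_cons, pvPoly_snoc, List.length_cons,
      List.length_reverse]
    ring

-- foldl of (+ g x) is the sum of the mapped list.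
theorem pvFoldlAdd {α : Type} (g : α → Int) : ∀ (l : List α) (a : Int),
    l.foldl (fun acc x => acc + g x) a = a + (l.map g).sum := by
  intro l
  induction l with
  | nil => intro a; simp
  | cons x t ih => intro a; simp [ih]; ring

-- Sum of x * k^e over an enumeration starting at s.
theorem pvEnumSum (k : Int) : ∀ (r : List Int) (s : Nat),
    ((PySem.List.enumerate r (s : Int)).map (fun p => p.2 * k ^ p.1.toNat)).sum
      = k ^ s * pvPoly k r := by
  intro r
  induction r with
  | nil => intro s; simp [PySem.List.enumerate_nil, pvPoly]
  | cons x t ih =>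
    intro s
    rw [PySem.List.enumerate_cons]
    have hcast : ((s : Int) + 1) = (((s + 1 : Nat) : Int)) := by push_cast; ring
    simp only [List.map_cons, List.sum_cons, hcast, ih (s + 1), pvPoly]
    have hs : ((s : Int)).toNat = s := by simp
    rw [hs]; ring

-- B's inner sum over the reversed prefix is the Horner value of the prefix.
theorem pvB_inner (k : Int) (p : List Int) :
    ((PySem.List.enumerate p.reverse 0).foldl (fun a q => a + q.2 * k ^ q.1.toNat) 0)
      = pvHorner k p := by
  rw [pvFoldlAdd (fun q : Int × Int => q.2 * k ^ q.1.toNat) (PySem.List.enumerate p.reverse 0) 0]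
  have h0 : ((0 : Nat) : Int) = 0 := by simp
  rw [← h0, pvEnumSum k p.reverse 0]
  have := pvHorner_gen k p 0
  simp only [pvHorner]
  rw [this]
  simp

-- ===== VERDICT (by name: the statement is the Claim_ definition above) =====
theorem prefix_polynomial_hash_spec : Claim_equal_prefix_polynomial_hash := by
  intro str k mod _ hpre
  unfold Spec_prefix_polynomial_hash prefix_polynomial_hash prefix_polynomial_hash_alt
  rcases hpre with hb | hemp
  · -- mod ≠ 0
    set cs := str.toList with hcs
    set xs : List Int := cs.map (fun c => ((c.toNat : Int) - 96)) with hxs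
    have h := pvGoA_eq_roll k mod cs [] 0
    simp only [List.nil_append, List.length_nil] at h
    have hroll := pvRoll_eq_pref k mod hb cs 0 [0]
    rw [pvMod_zero mod] at hroll
    have hA : pvGoA k mod cs (List.replicate (cs.length + 1) 0, 0) = [0] ++ pvPref k mod cs 0 := by
      rw [List.replicate_succ, h, hroll]
    rw [hA]
    have hP : pvPref k mod cs 0 = (List.range cs.length).map (fun t =>
        PySem.Int.mod (pvHorner k (xs.take (t + 1))) mod) := by
      have := pvPref_eq_map k mod cs []
      simpa [pvHorner] using this
    rw [hP]
    congr 1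
    have hlen : xs.length = cs.length := by simp [hxs]
    rw [PySem.List.pyRange_one 1 ((xs.length : Int) + 1)]
    have htn : (((xs.length : Int) + 1) - 1).toNat = cs.length := by
      simp [hlen]
    rw [htn, List.map_map]
    apply List.map_congr_left
    intro t ht
    have h1t : (1 : Int) + (t : Int) = (((t + 1 : Nat)) : Int) := by push_cast; ring
    simp only [Function.comp, h1t, PySem.List.slice_to_natCast]
    rw [pvB_inner k (xs.take (t + 1))]
  · -- empty string
    subst hemp
    simp [pvGoA, PySem.List.pyRange_one_eq_nil, String.toList]
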